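-- pv_equiv track=rewrite | github.com/breninhoinho/Ic | Projeto/Algoritmos_Mapeamento/Engineered_Mapping.py | gerar_distribuicao_distribuida
-- ===== SOURCE A (Python) =====
-- def gerar_distribuicao_distribuida(cores, tam):
--     # Cria um array vazio para os núcleos
--     distri = [None] * cores
--
--     # Calcula o número de núcleos ociosos
--     numero_cores_ociosos = cores - tam
--
--     # Calcula o tamanho do cluster
--     tam_cluster = tam // numero_cores_ociosos
--     if tam_cluster ==0:
--         tam_cluster =1
--     # Índice para controlar a posição atual no array
--     indice = 0
--
--     # Número do processo atual
--     processo = 1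
--
--     for i in range(numero_cores_ociosos):
--         # Preenche os processos no cluster atual
--         for j in range(tam_cluster):
--             if indice < cores and processo <= tam:
--                 distri[indice] = processo
--                 indice += 1
--                 processo += 1
--
--         # Insere um núcleo ocioso
--         if indice < cores:
--             distri[indice] = None
--             indice += 1
--
--     # Preenche quaisquer processos restantes
--     while processo <= tam and indice < cores:
--         distri[indice] = processo
--         indice += 1
--         processo += 1
--
--     return distri
-- ===== SOURCE B (Python) =====
-- def gerar_distribuicao_distribuida(cores, tam):
--     if tam <= 0:
--         return [None] * max(cores, 0)
--     if cores <= tam: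
--         return list(range(1, cores + 1))
--     noc = cores - tam
--     tc = max(1, tam // noc)
--     idle = {(i + 1) * tc + i for i in range(noc)}
--     out = []
--     p = 1
--     for idx in range(cores):
--         if idx not in idle and p <= tam:
--             out.append(p)
--             p += 1
--         else:
--             out.append(None)
--     return out
-- ===== Notes on version B (the rewrite author's own statement) =====
-- stated objective: alternative
-- what changed: A's cursor-driven nested cluster loops (fill tam_cluster processes, insert an idle core, then a trailing while loop) are replaced by precomputing the set of idle indices {(i+1)*tam_cluster+i} and doing one single sweep over the indices with a process counter.
import Mathlib
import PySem

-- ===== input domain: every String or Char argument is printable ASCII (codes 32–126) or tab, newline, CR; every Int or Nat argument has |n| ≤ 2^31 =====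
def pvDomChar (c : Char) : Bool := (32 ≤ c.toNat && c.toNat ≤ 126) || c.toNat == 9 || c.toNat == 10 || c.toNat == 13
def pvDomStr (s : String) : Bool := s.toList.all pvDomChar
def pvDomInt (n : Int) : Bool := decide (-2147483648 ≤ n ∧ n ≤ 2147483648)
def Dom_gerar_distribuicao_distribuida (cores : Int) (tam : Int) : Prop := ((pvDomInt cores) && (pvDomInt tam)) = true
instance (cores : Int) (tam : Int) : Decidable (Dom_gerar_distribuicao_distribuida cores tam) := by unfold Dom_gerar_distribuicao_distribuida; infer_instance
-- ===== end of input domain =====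

-- B replaces A's cursor-driven nested cluster loops by a precomputed idle-index set plus one
-- sweep over the indices (objective: alternative decomposition, similar cost).

-- ===== PORT A =====
-- body of A's inner 'for j in range(tam_cluster)' loop
def pvAInnerStep (cores tam : Int) (st2 : List (Option Int) × Int × Int) : List (Option Int) × Int × Int :=
  if st2.2.1 < cores ∧ st2.2.2 ≤ tam then
    (st2.1.set st2.2.1.toNat (some st2.2.2), st2.2.1 + 1, st2.2.2 + 1)
  else st2

-- body of A's outer 'for i in range(numero_cores_ociosos)' loop
def pvAOuterStep (cores tam tam_cluster : Int) (st : List (Option Int) × Int × Int) : List (Option Int) × Int × Int :=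
  let st2 := (PySem.List.pyRange 0 tam_cluster 1).foldl (fun st2 _j => pvAInnerStep cores tam st2) st
  if st2.2.1 < cores then (st2.1.set st2.2.1.toNat (none : Option Int), st2.2.1 + 1, st2.2.2)
  else st2

-- A's trailing 'while processo <= tam and indice < cores' loop
def pvAWhile (cores tam : Int) (distri : List (Option Int)) (indice processo : Int) : List (Option Int) :=
  if h : processo ≤ tam ∧ indice < cores then
    pvAWhile cores tam (distri.set indice.toNat (some processo)) (indice + 1) (processo + 1)
  else distri
termination_by (tam + 1 - processo).toNat
decreasing_by omega

def gerar_distribuicao_distribuida (cores : Int) (tam : Int) : List (Option Int) :=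
  let distri : List (Option Int) := List.replicate (max cores 0).toNat none
  let numero_cores_ociosos := cores - tam
  let tam_cluster0 := PySem.Int.floordiv tam numero_cores_ociosos
  let tam_cluster := if tam_cluster0 = 0 then 1 else tam_cluster0
  let st := (PySem.List.pyRange 0 numero_cores_ociosos 1).foldl
    (fun st _i => pvAOuterStep cores tam tam_cluster st) (distri, (0 : Int), (1 : Int))
  pvAWhile cores tam st.1 st.2.1 st.2.2

-- ===== PORT B =====
def gerar_distribuicao_distribuida_alt (cores : Int) (tam : Int) : List (Option Int) :=
  if tam ≤ 0 then List.replicate (max cores 0).toNat none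
  else if cores ≤ tam then (PySem.List.pyRange 1 (cores + 1) 1).map some
  else
    let noc := cores - tam
    let tc := max 1 (PySem.Int.floordiv tam noc)
    let idle : PySem.Set Int := PySem.Set.ofList ((PySem.List.pyRange 0 noc 1).map (fun i => (i + 1) * tc + i))
    ((PySem.List.pyRange 0 cores 1).foldl (fun (st : List (Option Int) × Int) idx =>
        if PySem.Set.contains idle idx = false ∧ st.2 ≤ tam then (st.1 ++ [some st.2], st.2 + 1)
        else (st.1 ++ [(none : Option Int)], st.2)) (([] : List (Option Int)), (1 : Int))).1

-- ===== PRECONDITION & SPEC =====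
-- Pre_ excludes exactly cores = tam, where A raises ZeroDivisionError on 'tam // (cores - tam)'.
def Pre_gerar_distribuicao_distribuida (cores : Int) (tam : Int) : Prop := cores ≠ tam
instance (cores : Int) (tam : Int) : Decidable (Pre_gerar_distribuicao_distribuida cores tam) := by unfold Pre_gerar_distribuicao_distribuida; infer_instance
def pvWitness_gerar_distribuicao_distribuida : Int × Int := (7, 3)

def Spec_gerar_distribuicao_distribuida (cores : Int) (tam : Int) (out : List (Option Int)) : Prop := out = gerar_distribuicao_distribuida_alt cores tam
instance (cores : Int) (tam : Int) (out : List (Option Int)) : Decidable (Spec_gerar_distribuicao_distribuida cores tam out) := by unfold Spec_gerar_distribuicao_distribuida; infer_instance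

-- ===== CLAIM (what is proved, stated in full; the proofs are below) =====
def Claim_equal_gerar_distribuicao_distribuida : Prop := ∀ (cores : Int) (tam : Int), Dom_gerar_distribuicao_distribuida cores tam → Pre_gerar_distribuicao_distribuida cores tam → Spec_gerar_distribuicao_distribuida cores tam (gerar_distribuicao_distribuida cores tam)

-- ===== LEMMAS AND PROOFS =====

-- ---- spec helpers: per-index characterisation of the distribution ----
def pvIdle (d noc n : Int) : Bool := (n + 1) % d == 0 && decide (n < noc * d)
def pvK (d noc n : Int) : Int := min noc (n / d)
def pvVal (tam d noc n : Int) : Option Int :=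
  if pvIdle d noc n then none
  else if n - pvK d noc n + 1 ≤ tam then some (n - pvK d noc n + 1) else none
def pvBuild (cores tam d noc : Int) (n : Nat) : List (Option Int) :=
  (List.range n).map (fun (k : Nat) => pvVal tam d noc (k : Int)) ++ List.replicate (cores.toNat - n) none

theorem pvSetAppend {α : Type} (xs : List α) (y : α) (ys : List α) (v : α) :
    (xs ++ y :: ys).set xs.length v = xs ++ v :: ys := by
  induction xs with
  | nil => rfl
  | cons a t ih => simp [ih]

theorem pvDivBlock (d i j : Int) (hd : 0 < d) (hj0 : 0 ≤ j) (hjd : j < d) :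
    (i * d + j) / d = i := by
  rw [add_comm, mul_comm, Int.add_mul_ediv_left j i (by omega), Int.ediv_eq_zero_of_lt hj0 hjd]
  ring

theorem pvEdivSucc (d n : Int) (hd : 0 < d) (hn : 0 ≤ n) :
    (n + 1) / d = n / d + if d ∣ (n + 1) then 1 else 0 := by
  by_cases h : d ∣ (n + 1)
  · rw [if_pos h]
    obtain ⟨q, hq⟩ := h
    have h2 : (n + 1) / d = q := by
      rw [hq, mul_comm]
      exact Int.mul_ediv_cancel _ (by omega)
    have h3 : n = (q - 1) * d + (d - 1) := by
      have hr : (q - 1) * d + (d - 1) = d * q - 1 := by ring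
      omega
    have h4 : n / d = q - 1 := by
      rw [h3]
      exact pvDivBlock d (q - 1) (d - 1) hd (by omega) (by omega)
    omega
  · rw [if_neg h]
    have h1 : d * (n / d) + n % d = n := Int.ediv_add_emod n d
    have h2 : 0 ≤ n % d := Int.emod_nonneg n (by omega)
    have h3 : n % d < d := Int.emod_lt_of_pos n hd
    have h4 : n % d + 1 ≠ d := by
      intro hc
      apply h
      refine ⟨n / d + 1, ?_⟩
      have h5 : d * (n / d + 1) = d * (n / d) + d := by ring
      omega
    have h6 : (n + 1) / d = n / d := by
      have h7 : n + 1 = (n / d) * d + (n % d + 1) := by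
        have h8 : (n / d) * d = d * (n / d) := mul_comm _ _
        omega
      rw [h7]
      exact pvDivBlock d (n / d) (n % d + 1) hd (by omega) (by omega)
    omega

theorem pvKBlock (d noc i j : Int) (hd : 0 < d) (hi0 : 0 ≤ i) (hin : i ≤ noc)
    (hj0 : 0 ≤ j) (hjd : j < d) : pvK d noc (i * d + j) = i := by
  unfold pvK
  rw [pvDivBlock d i j hd hj0 hjd]
  omega

theorem pvKSucc (d noc n : Int) (hd : 0 < d) (hn : 0 ≤ n) :
    pvK d noc (n + 1) = pvK d noc n + (if pvIdle d noc n then 1 else 0) := by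
  unfold pvK pvIdle
  have hdl : n < noc * d ↔ n / d < noc := by
    constructor
    · intro h
      exact Int.ediv_lt_of_lt_mul hd h
    · intro h
      have hm1 : d * (n / d) + n % d = n := Int.ediv_add_emod n d
      have hm2 : n % d < d := Int.emod_lt_of_pos n hd
      have h4 : d * (n / d + 1) ≤ d * noc := mul_le_mul_of_nonneg_left (by omega) (by omega)
      have h6 : d * (n / d + 1) = d * (n / d) + d := by ring
      have h7 : d * noc = noc * d := mul_comm d noc
      omega
  rw [pvEdivSucc d n hd hn]
  by_cases hdvd : d ∣ (n + 1)
  · have hb : ((n + 1) % d == 0) = true := by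
      simp only [beq_iff_eq]
      exact Int.dvd_iff_emod_eq_zero.mp hdvd
    rw [if_pos hdvd, hb]
    simp only [Bool.true_and]
    by_cases hlt : n < noc * d
    · rw [if_pos (by simp [hlt])]
      have := hdl.mp hlt
      omega
    · rw [if_neg (by simp [hlt])]
      have : ¬ (n / d < noc) := fun hc => hlt (hdl.mpr hc)
      omega
  · have hb : ((n + 1) % d == 0) = false := by
      rw [beq_eq_false_iff_ne]
      intro hc
      exact hdvd (Int.dvd_iff_emod_eq_zero.mpr hc)
    rw [if_neg hdvd, hb]
    simp

theorem pvKTail (d noc n : Int) (hd : 0 < d) (hns : noc * d ≤ n) : pvK d noc n = noc := by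
  unfold pvK
  have : noc ≤ n / d := (Int.le_ediv_iff_mul_le hd).mpr hns
  omega

theorem pvKNonneg (d noc n : Int) (hd : 0 < d) (hn : 0 ≤ n) (hnoc : 0 ≤ noc) :
    0 ≤ pvK d noc n ∧ pvK d noc n ≤ n := by
  unfold pvK
  have h1 : 0 ≤ n / d := Int.ediv_nonneg hn (by omega)
  have h2 : n / d ≤ n := Int.ediv_le_self d hn
  omega

theorem pvValProc (tam d noc tc i j : Int) (hd : d = tc + 1) (htc : 1 ≤ tc)
    (hi0 : 0 ≤ i) (hin : i ≤ noc) (hj0 : 0 ≤ j) (hj : j < tc)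
    (hp : i * tc + j + 1 ≤ tam) :
    pvVal tam d noc (i * d + j) = some (i * tc + j + 1) := by
  have hd0 : 0 < d := by omega
  have hkey : i * d = i * tc + i := by rw [hd]; ring
  have hnotdvd : ¬ d ∣ (i * d + j + 1) := by
    intro hdvd
    have h2 : d ∣ (j + 1) := by
      have h3 : (j + 1) = (i * d + j + 1) - i * d := by ring
      rw [h3]
      exact dvd_sub hdvd ⟨i, mul_comm i d⟩
    have := Int.le_of_dvd (by omega) h2
    omega
  have hmodne : ((i * d + j + 1) % d == 0) = false := by
    rw [beq_eq_false_iff_ne]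
    intro hc
    exact hnotdvd (Int.dvd_iff_emod_eq_zero.mpr hc)
  unfold pvVal pvIdle
  rw [pvKBlock d noc i j hd0 hi0 hin hj0 (by omega), hmodne]
  simp only [Bool.false_and]
  rw [if_neg Bool.false_ne_true, if_pos (by omega)]
  congr 1
  omega

theorem pvValIdle (tam d noc tc i : Int) (hd : d = tc + 1) (htc : 1 ≤ tc)
    (hi0 : 0 ≤ i) (hin : i < noc) :
    pvVal tam d noc (i * d + tc) = none := by
  have h1 : d ∣ (i * d + tc + 1) := ⟨i + 1, by rw [hd]; ring⟩
  have h8 : (i + 1) * d ≤ noc * d := mul_le_mul_of_nonneg_right (by omega) (by omega)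
  have h9 : (i + 1) * d = i * d + d := by ring
  have h2 : i * d + tc < noc * d := by omega
  have hcond : pvIdle d noc (i * d + tc) = true := by
    unfold pvIdle
    simp only [Bool.and_eq_true, beq_iff_eq, decide_eq_true_eq]
    exact ⟨Int.dvd_iff_emod_eq_zero.mp h1, h2⟩
  unfold pvVal
  rw [if_pos hcond]

theorem pvValExhaust (tam d noc tc i : Int) (hd : d = tc + 1) (htc : 1 ≤ tc)
    (hi0 : 0 ≤ i) (hin : i < noc) (htam : 0 ≤ tam) (hex : tam < (i + 1) * tc) :
    pvVal tam d noc (tam + i) = none := by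
  unfold pvVal
  by_cases hidle : pvIdle d noc (tam + i)
  · rw [if_pos hidle]
  · rw [if_neg hidle]
    have hk : pvK d noc (tam + i) ≤ i := by
      unfold pvK
      have hkey : (i + 1) * d = (i + 1) * tc + i + 1 := by rw [hd]; ring
      have : (tam + i) / d < i + 1 := Int.ediv_lt_of_lt_mul (by omega) (by omega)
      omega
    rw [if_neg (by omega)]

theorem pvValTail (tam d noc tc n : Int) (hd : d = tc + 1) (htc : 1 ≤ tc)
    (hnoc : 0 ≤ noc) (hn : noc * d ≤ n) (hle : n - noc + 1 ≤ tam) :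
    pvVal tam d noc n = some (n - noc + 1) := by
  have hcond : pvIdle d noc n = false := by
    unfold pvIdle
    simp only [Bool.and_eq_false_iff]
    right
    simp only [decide_eq_false_iff_not]
    omega
  unfold pvVal
  rw [hcond]
  rw [if_neg Bool.false_ne_true, pvKTail d noc n (by omega) hn, if_pos hle]

theorem pvBuildSet (cores tam d noc : Int) (n : Nat) (hn : n < cores.toNat) :
    (pvBuild cores tam d noc n).set n (pvVal tam d noc (n : Int)) = pvBuild cores tam d noc (n + 1) := by
  unfold pvBuild
  have hrep : List.replicate (cores.toNat - n) (none : Option Int)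
      = none :: List.replicate (cores.toNat - (n + 1)) none := by
    rw [show cores.toNat - n = (cores.toNat - (n + 1)) + 1 from by omega, List.replicate_succ]
  rw [hrep]
  have hset := pvSetAppend ((List.range n).map (fun (k : Nat) => pvVal tam d noc (k : Int)))
    (none : Option Int) (List.replicate (cores.toNat - (n + 1)) none) (pvVal tam d noc (n : Int))
  rw [List.length_map, List.length_range] at hset
  rw [hset, List.range_succ, List.map_append]
  simp

theorem pvFoldlIgnore {α β : Type} (f : α → α) :
    ∀ (l : List β) (init : α), l.foldl (fun st _ => f st) init = f^[l.length] init := by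
  intro l
  induction l with
  | nil => intro init; rfl
  | cons a t ih =>
    intro init
    simp only [List.foldl_cons, List.length_cons, ih, Function.iterate_succ_apply]

-- one cluster of A's outer loop
theorem pvInner (cores tam noc tc d : Int) (hnoc : noc = cores - tam) (htam : 0 < tam)
    (hlt : tam < cores) (htc : 1 ≤ tc) (hd : d = tc + 1)
    (i : Int) (hi0 : 0 ≤ i) (hin : i < noc) :
    ∀ (jn : Nat), (jn : Int) ≤ tc →
    (pvAInnerStep cores tam)^[jn]
      (pvBuild cores tam d noc (min (i * tc) tam + i).toNat, min (i * tc) tam + i, min (i * tc) tam + 1)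
    = (pvBuild cores tam d noc (min (i * tc + jn) tam + i).toNat, min (i * tc + jn) tam + i,
        min (i * tc + jn) tam + 1) := by
  intro jn
  induction jn with
  | zero => intro _; simp
  | succ m ih =>
    intro hle
    push_cast at hle
    have hm : (m : Int) ≤ tc := by omega
    rw [Function.iterate_succ_apply', ih hm]
    have ha : 0 ≤ i * tc := mul_nonneg hi0 (by omega)
    have hkey : i * d = i * tc + i := by rw [hd]; ring
    unfold pvAInnerStep
    dsimp only
    push_cast
    by_cases hcase : i * tc + (m : Int) < tam
    · rw [if_pos (by constructor <;> omega)]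
      have hmin1 : min (i * tc + (m : Int)) tam = i * tc + m := by omega
      have hidx : min (i * tc + (m : Int)) tam + i = i * d + m := by omega
      have hidx0 : 0 ≤ i * d + (m : Int) := by omega
      have hval : pvVal tam d noc (((i * d + (m : Int)).toNat : Nat) : Int)
          = some (min (i * tc + (m : Int)) tam + 1) := by
        rw [Int.toNat_of_nonneg hidx0,
          pvValProc tam d noc tc i m hd htc hi0 (by omega) (by positivity) (by omega) (by omega)]
        congr 1
        omega
      have hlt2 : (i * d + (m : Int)).toNat < cores.toNat := by omega
      simp only [Prod.mk.injEq]
      refine ⟨?_, ?_, ?_⟩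
      · rw [hidx, ← hval, pvBuildSet cores tam d noc _ hlt2]
        congr 1
        omega
      · omega
      · omega
    · rw [if_neg (by intro ⟨_, hc⟩; omega)]
      rw [show min (i * tc + ((m : Int) + 1)) tam = min (i * tc + (m : Int)) tam from by omega]

-- A's whole outer loop
theorem pvOuter (cores tam noc tc d : Int) (hnoc : noc = cores - tam) (htam : 0 < tam)
    (hlt : tam < cores) (htc : 1 ≤ tc) (hd : d = tc + 1) :
    ∀ (iN : Nat), (iN : Int) ≤ noc →
    (pvAOuterStep cores tam tc)^[iN] (pvBuild cores tam d noc 0, 0, 1)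
    = (pvBuild cores tam d noc (min ((iN : Int) * tc) tam + iN).toNat, min ((iN : Int) * tc) tam + iN,
        min ((iN : Int) * tc) tam + 1) := by
  intro iN
  induction iN with
  | zero =>
    intro _
    have h0 : min (0 : Int) tam = 0 := by omega
    simp [h0]
  | succ m ih =>
    intro hle
    push_cast at hle
    have hm : (m : Int) ≤ noc := by omega
    have hmlt : (m : Int) < noc := by omega
    have hm0 : (0 : Int) ≤ (m : Int) := by positivity
    rw [Function.iterate_succ_apply', ih hm]
    unfold pvAOuterStep
    rw [pvFoldlIgnore (pvAInnerStep cores tam), PySem.List.length_pyRange_one,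
      show ((tc - 0).toNat : Nat) = tc.toNat from by omega,
      pvInner cores tam noc tc d hnoc htam hlt htc hd m hm0 hmlt tc.toNat (by omega),
      Int.toNat_of_nonneg (show (0:Int) ≤ tc from by omega)]
    dsimp only
    have ha : 0 ≤ (m : Int) * tc := mul_nonneg hm0 (by omega)
    rw [if_pos (show min ((m : Int) * tc + tc) tam + m < cores from by omega)]
    have hidx0 : 0 ≤ min ((m : Int) * tc + tc) tam + m := by omega
    have hvalnone : pvVal tam d noc (((min ((m : Int) * tc + tc) tam + m).toNat : Nat) : Int) = none := by
      rw [Int.toNat_of_nonneg hidx0]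
      by_cases hcase : (m : Int) * tc + tc ≤ tam
      · rw [show min ((m : Int) * tc + tc) tam + (m : Int) = m * d + tc from by rw [hd]; ring_nf; omega]
        exact pvValIdle tam d noc tc m hd htc hm0 hmlt
      · rw [show min ((m : Int) * tc + tc) tam + (m : Int) = tam + m from by omega]
        have hkey : ((m : Int) + 1) * tc = m * tc + tc := by ring
        exact pvValExhaust tam d noc tc m hd htc hm0 hmlt (by omega) (by omega)
    have hlt2 : (min ((m : Int) * tc + tc) tam + m).toNat < cores.toNat := by omega
    have hstep : ((m : Int) + 1) * tc = m * tc + tc := by ring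
    simp only [Prod.mk.injEq]
    refine ⟨?_, ?_, ?_⟩
    · rw [← hvalnone, pvBuildSet cores tam d noc _ hlt2]
      congr 1
      push_cast
      omega
    · push_cast
      omega
    · push_cast
      omega

-- A's trailing while loop, main case
theorem pvWhileMain (cores tam noc tc d : Int) (hnoc : noc = cores - tam) (htam : 0 < tam)
    (hlt : tam < cores) (htc : 1 ≤ tc) (hd : d = tc + 1) :
    ∀ (fuel : Nat) (n : Int), noc * d ≤ n → n ≤ cores → fuel = (cores - n).toNat →
    pvAWhile cores tam (pvBuild cores tam d noc n.toNat) n (n - noc + 1)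
      = pvBuild cores tam d noc cores.toNat := by
  intro fuel
  induction fuel with
  | zero =>
    intro n h1 h2 h3
    have : n = cores := by omega
    subst this
    rw [pvAWhile, dif_neg (by omega)]
  | succ m ih =>
    intro n h1 h2 h3
    have hnd : 0 ≤ noc * d := mul_nonneg (by omega) (by omega)
    rw [pvAWhile]
    by_cases hc : n < cores
    · rw [dif_pos ⟨by omega, hc⟩]
      have hval : pvVal tam d noc ((n.toNat : Nat) : Int) = some (n - noc + 1) := by
        rw [Int.toNat_of_nonneg (by omega)]
        exact pvValTail tam d noc tc n hd htc (by omega) h1 (by omega)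
      have hlt2 : n.toNat < cores.toNat := by omega
      rw [← hval, pvBuildSet cores tam d noc _ hlt2]
      rw [show n.toNat + 1 = (n + 1).toNat from by omega,
        show (n - noc + 1) + 1 = (n + 1) - noc + 1 from by ring]
      exact ih (n + 1) (by omega) (by omega) (by omega)
    · rw [dif_neg (by omega)]
      have : n = cores := by omega
      subst this
      rfl

-- ---- degenerate case tam ≤ 0: everything stays None ----
theorem pvInnerTriv (cores tam : Int) (htam : tam ≤ 0) :
    ∀ (l : List Int) (st : List (Option Int) × Int × Int), st.2.2 = 1 →
    l.foldl (fun st2 _j => pvAInnerStep cores tam st2) st = st := by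
  intro l
  induction l with
  | nil => intro st _; rfl
  | cons a t ih =>
    intro st hp
    simp only [List.foldl_cons]
    rw [show pvAInnerStep cores tam st = st from by unfold pvAInnerStep; rw [if_neg (by omega)]]
    exact ih st hp

theorem pvOuterTriv (cores tam tc : Int) (htam : tam ≤ 0) (M : Nat) :
    ∀ (l : List Int) (st : List (Option Int) × Int × Int),
    st.1 = List.replicate M (none : Option Int) → st.2.2 = 1 →
    (l.foldl (fun st _i => pvAOuterStep cores tam tc st) st).1 = List.replicate M (none : Option Int) ∧
    (l.foldl (fun st _i => pvAOuterStep cores tam tc st) st).2.2 = 1 := by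
  intro l
  induction l with
  | nil => intro st h1 h2; exact ⟨h1, h2⟩
  | cons a t ih =>
    intro st h1 h2
    simp only [List.foldl_cons]
    have hbody : pvAOuterStep cores tam tc st
        = if st.2.1 < cores then (st.1.set st.2.1.toNat (none : Option Int), st.2.1 + 1, st.2.2) else st := by
      unfold pvAOuterStep
      rw [pvInnerTriv cores tam htam _ st h2]
    rw [hbody]
    by_cases hc : st.2.1 < cores
    · rw [if_pos hc]
      exact ih _ (by simp [h1]) (by simp [h2])
    · rw [if_neg hc]
      exact ih st h1 h2

theorem pvCaseNonpos (cores tam : Int) (htam : tam ≤ 0) :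
    gerar_distribuicao_distribuida cores tam = List.replicate (max cores 0).toNat (none : Option Int) := by
  simp only [gerar_distribuicao_distribuida]
  obtain ⟨h1, h2⟩ := pvOuterTriv cores tam
    (if PySem.Int.floordiv tam (cores - tam) = 0 then 1 else PySem.Int.floordiv tam (cores - tam))
    htam (max cores 0).toNat (PySem.List.pyRange 0 (cores - tam) 1)
    (List.replicate (max cores 0).toNat none, 0, 1) rfl rfl
  rw [pvAWhile, dif_neg (by omega), h1]

-- ---- degenerate case 0 < tam, cores < tam: the while loop fills 1..cores ----
theorem pvWhileFill (cores tam : Int) (hct : cores ≤ tam) :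
    ∀ (fuel : Nat) (n p : Int), 0 ≤ n → n ≤ cores → p = n + 1 → fuel = (cores - n).toNat →
    pvAWhile cores tam
      ((List.range n.toNat).map (fun (k : Nat) => some ((k : Int) + 1)) ++
        List.replicate (cores.toNat - n.toNat) (none : Option Int)) n p
      = (List.range cores.toNat).map (fun (k : Nat) => some ((k : Int) + 1)) := by
  intro fuel
  induction fuel with
  | zero =>
    intro n p h0 h1 hp h2
    have : n = cores := by omega
    subst this
    subst hp
    rw [pvAWhile, dif_neg (by omega)]
    simp
  | succ m ih =>
    intro n p h0 h1 hp h2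
    subst hp
    rw [pvAWhile]
    by_cases hc : n < cores
    · rw [dif_pos ⟨by omega, hc⟩]
      have hrep : List.replicate (cores.toNat - n.toNat) (none : Option Int)
          = none :: List.replicate (cores.toNat - (n.toNat + 1)) none := by
        rw [show cores.toNat - n.toNat = (cores.toNat - (n.toNat + 1)) + 1 from by omega,
          List.replicate_succ]
      have hset := pvSetAppend ((List.range n.toNat).map (fun (k : Nat) => some ((k : Int) + 1)))
        (none : Option Int) (List.replicate (cores.toNat - (n.toNat + 1)) none) (some (n + 1))
      rw [List.length_map, List.length_range] at hset
      rw [hrep, hset]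
      have hpre : (List.range n.toNat).map (fun (k : Nat) => some ((k : Int) + 1)) ++
            some (n + 1) :: List.replicate (cores.toNat - (n.toNat + 1)) (none : Option Int)
          = (List.range (n.toNat + 1)).map (fun (k : Nat) => some ((k : Int) + 1)) ++
            List.replicate (cores.toNat - (n.toNat + 1)) (none : Option Int) := by
        rw [List.range_succ, List.map_append]
        simp only [List.map_cons, List.map_nil, List.append_assoc, List.singleton_append]
        congr 3
        omega
      rw [hpre, show n.toNat + 1 = (n + 1).toNat from by omega]
      exact ih (n + 1) (n + 1 + 1) (by omega) (by omega) rfl (by omega)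
    · rw [dif_neg (by omega)]
      have : n = cores := by omega
      subst this
      simp

theorem pvCaseFewCores (cores tam : Int) (htam : 0 < tam) (hct : cores < tam) :
    gerar_distribuicao_distribuida cores tam
      = (List.range cores.toNat).map (fun (k : Nat) => some ((k : Int) + 1)) := by
  simp only [gerar_distribuicao_distribuida]
  rw [PySem.List.pyRange_one_eq_nil (show cores - tam ≤ (0 : Int) from by omega)]
  simp only [List.foldl_nil]
  by_cases hc : 0 < cores
  · have hinit : List.replicate (max cores 0).toNat (none : Option Int)
        = (List.range (Int.toNat 0)).map (fun (k : Nat) => some ((k : Int) + 1)) ++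
          List.replicate (cores.toNat - Int.toNat 0) (none : Option Int) := by
      rw [show (max cores 0).toNat = cores.toNat from by omega]
      simp
    rw [hinit]
    exact pvWhileFill cores tam (by omega) (cores - 0).toNat 0 1 le_rfl (by omega) (by ring) rfl
  · rw [pvAWhile, dif_neg (by omega)]
    rw [show (max cores 0).toNat = 0 from by omega, show cores.toNat = 0 from by omega]
    simp

-- ---- B's idle set membership ----
theorem pvMemIdle (noc tc d n : Int) (hd : d = tc + 1) (htc : 1 ≤ tc) (hnoc : 0 ≤ noc) (hn : 0 ≤ n) :
    PySem.Set.contains (PySem.Set.ofList ((PySem.List.pyRange 0 noc 1).map (fun i => (i + 1) * tc + i))) n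
      = pvIdle d noc n := by
  have hiff : n ∈ ((PySem.List.pyRange 0 noc 1).map (fun i => (i + 1) * tc + i)) ↔
      (d ∣ (n + 1) ∧ n < noc * d) := by
    simp only [List.mem_map, PySem.List.mem_pyRange_one]
    constructor
    · rintro ⟨i, ⟨hi0, hin⟩, hfi⟩
      subst hfi
      constructor
      · exact ⟨i + 1, by rw [hd]; ring⟩
      · have h1 : (i + 1) * d ≤ noc * d := mul_le_mul_of_nonneg_right (by omega) (by omega)
        have h2 : (i + 1) * tc + i + 1 = (i + 1) * d := by rw [hd]; ring
        omega
    · rintro ⟨⟨q, hq⟩, hlt⟩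
      have hq1 : 1 ≤ q := by
        by_contra hcon
        have : d * q ≤ 0 := mul_nonpos_iff.mpr (Or.inl ⟨by omega, by omega⟩)
        omega
      have hqn : q ≤ noc := by
        by_contra hcon
        have h5 : d * (noc + 1) ≤ d * q := mul_le_mul_of_nonneg_left (by omega) (by omega)
        have h6 : d * (noc + 1) = noc * d + d := by ring
        omega
      refine ⟨q - 1, ⟨by omega, by omega⟩, ?_⟩
      have h7 : (q - 1 + 1) * tc + (q - 1) = q * d - 1 := by rw [hd]; ring
      have h8 : d * q = q * d := mul_comm d q
      omega
  rw [Bool.eq_iff_iff, PySem.Set.contains_iff, PySem.Set.mem_ofList, hiff]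
  unfold pvIdle
  simp only [Bool.and_eq_true, beq_iff_eq, decide_eq_true_eq]
  rw [← Int.dvd_iff_emod_eq_zero]

-- ---- B's single sweep ----
theorem pvBfold (cores tam noc tc d : Int) (hnoc : noc = cores - tam) (htam : 0 < tam)
    (hlt : tam < cores) (htc : 1 ≤ tc) (hd : d = tc + 1)
    (S : PySem.Set Int) (hS : ∀ n : Int, 0 ≤ n → PySem.Set.contains S n = pvIdle d noc n) :
    ∀ (nN : Nat),
    (List.range nN).foldl (fun (st : List (Option Int) × Int) (k : Nat) =>
        if PySem.Set.contains S (k : Int) = false ∧ st.2 ≤ tam then (st.1 ++ [some st.2], st.2 + 1)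
        else (st.1 ++ [(none : Option Int)], st.2)) ([], 1)
      = ((List.range nN).map (fun (k : Nat) => pvVal tam d noc (k : Int)),
          min ((nN : Int) - pvK d noc (nN : Int)) tam + 1) := by
  intro nN
  induction nN with
  | zero =>
    simp only [List.range_zero, List.foldl_nil, List.map_nil, Nat.cast_zero]
    rw [show pvK d noc 0 = 0 from by unfold pvK; rw [Int.zero_ediv]; omega]
    rw [show min (0 - 0 : Int) tam = 0 from by omega]
    norm_num
  | succ m ih =>
    rw [List.range_succ, List.foldl_append, ih]
    simp only [List.foldl_cons, List.foldl_nil]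
    have hm0 : (0 : Int) ≤ (m : Int) := by positivity
    obtain ⟨hk0, hkm⟩ := pvKNonneg d noc (m : Int) (by omega) hm0 (by omega)
    have hksucc := pvKSucc d noc (m : Int) (by omega) hm0
    rw [hS (m : Int) hm0]
    by_cases hb : pvIdle d noc (m : Int) = true
    · rw [if_neg (by simp [hb])]
      rw [hb, if_pos rfl] at hksucc
      simp only [Prod.mk.injEq]
      constructor
      · rw [List.map_append]
        simp only [List.map_cons, List.map_nil]
        congr 2
        unfold pvVal
        rw [if_pos hb]
      · push_cast
        omega
    · have hb' : pvIdle d noc (m : Int) = false := by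
        cases h : pvIdle d noc (m : Int)
        · rfl
        · exact absurd h hb
      rw [hb', if_neg (by simp)] at hksucc
      by_cases hp : (m : Int) - pvK d noc (m : Int) + 1 ≤ tam
      · rw [if_pos ⟨hb', by omega⟩]
        simp only [Prod.mk.injEq]
        constructor
        · rw [List.map_append]
          simp only [List.map_cons, List.map_nil]
          congr 2
          unfold pvVal
          rw [hb', if_neg Bool.false_ne_true, if_pos hp]
          congr 1
          omega
        · push_cast
          omega
      · rw [if_neg (by intro ⟨_, hc⟩; omega)]
        simp only [Prod.mk.injEq]
        constructor
        · rw [List.map_append]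
          simp only [List.map_cons, List.map_nil]
          congr 2
          unfold pvVal
          rw [hb', if_neg Bool.false_ne_true, if_neg hp]
        · push_cast
          omega

-- ---- the main case 0 < tam < cores ----
theorem pvMain (cores tam : Int) (htam : 0 < tam) (hlt : tam < cores) :
    gerar_distribuicao_distribuida cores tam = gerar_distribuicao_distribuida_alt cores tam := by
  have hnoc : (0 : Int) < cores - tam := by omega
  have hfd : PySem.Int.floordiv tam (cores - tam) = tam / (cores - tam) :=
    PySem.Int.floordiv_eq_ediv_of_pos hnoc
  have hq0 : 0 ≤ tam / (cores - tam) := Int.ediv_nonneg (by omega) (by omega)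
  have hclamp : (if tam / (cores - tam) = 0 then (1 : Int) else tam / (cores - tam))
      = max 1 (tam / (cores - tam)) := by
    by_cases h : tam / (cores - tam) = 0
    · simp [h]
    · rw [if_neg h]
      omega
  set tc := max 1 (tam / (cores - tam)) with htcdef
  have htc : 1 ≤ tc := le_max_left _ _
  have hA : gerar_distribuicao_distribuida cores tam
      = (List.range cores.toNat).map (fun (k : Nat) => pvVal tam (tc + 1) (cores - tam) (k : Int)) := by
    simp only [gerar_distribuicao_distribuida]
    rw [hfd, hclamp]
    rw [pvFoldlIgnore (pvAOuterStep cores tam tc), PySem.List.length_pyRange_one]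
    have hinit : (List.replicate (max cores 0).toNat (none : Option Int), (0 : Int), (1 : Int))
        = (pvBuild cores tam (tc + 1) (cores - tam) 0, (0 : Int), (1 : Int)) := by
      unfold pvBuild
      rw [show (max cores 0).toNat = cores.toNat from by omega]
      simp
    rw [hinit]
    have houter := pvOuter cores tam (cores - tam) tc (tc + 1) rfl htam hlt htc rfl
      (cores - tam - 0).toNat (by omega)
    rw [show (((cores - tam - 0).toNat : Nat) : Int) = cores - tam from by omega] at houter
    rw [houter]
    dsimp only
    by_cases hcase : (cores - tam) * tc ≤ tam
    · have hmin : min ((cores - tam) * tc) tam = (cores - tam) * tc := by omega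
      have h0le : 0 ≤ (cores - tam) * tc := mul_nonneg (by omega) (by omega)
      rw [hmin, show (cores - tam) * tc + 1 = ((cores - tam) * tc + (cores - tam)) - (cores - tam) + 1 from by ring]
      have hw := pvWhileMain cores tam (cores - tam) tc (tc + 1) rfl htam hlt htc rfl
        (cores - ((cores - tam) * tc + (cores - tam))).toNat ((cores - tam) * tc + (cores - tam))
        (by rw [show (cores - tam) * (tc + 1) = (cores - tam) * tc + (cores - tam) from by ring])
        (by omega) rfl
      rw [hw]
      unfold pvBuild
      simp
    · have hmin : min ((cores - tam) * tc) tam = tam := by omega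
      rw [hmin, pvAWhile, dif_neg (by omega)]
      rw [show (tam + (cores - tam)).toNat = cores.toNat from by omega]
      unfold pvBuild
      simp
  have hB : gerar_distribuicao_distribuida_alt cores tam
      = (List.range cores.toNat).map (fun (k : Nat) => pvVal tam (tc + 1) (cores - tam) (k : Int)) := by
    simp only [gerar_distribuicao_distribuida_alt]
    rw [if_neg (by omega), if_neg (by omega)]
    rw [hfd, ← htcdef]
    rw [show PySem.List.pyRange 0 cores 1 = (List.range cores.toNat).map (fun (k : Nat) => 0 + (k : Int))
      from by rw [PySem.List.pyRange_one, show cores - 0 = cores from by ring]]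
    rw [List.foldl_map]
    simp only [zero_add]
    rw [pvBfold cores tam (cores - tam) tc (tc + 1) rfl htam hlt htc rfl _
      (fun n hn => pvMemIdle (cores - tam) tc (tc + 1) n rfl htc (by omega) hn) cores.toNat]
  rw [hA, hB]

-- ---- the alt port on the two degenerate branches ----
theorem pvAltNonpos (cores tam : Int) (htam : tam ≤ 0) :
    gerar_distribuicao_distribuida_alt cores tam = List.replicate (max cores 0).toNat (none : Option Int) := by
  simp only [gerar_distribuicao_distribuida_alt]
  rw [if_pos htam]

theorem pvAltFewCores (cores tam : Int) (htam : 0 < tam) (hct : cores < tam) :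
    gerar_distribuicao_distribuida_alt cores tam
      = (List.range cores.toNat).map (fun (k : Nat) => some ((k : Int) + 1)) := by
  simp only [gerar_distribuicao_distribuida_alt]
  rw [if_neg (by omega), if_pos (by omega)]
  rw [PySem.List.pyRange_one, List.map_map,
    show ((cores + 1) - 1).toNat = cores.toNat from by omega]
  apply List.map_congr_left
  intro k _
  simp only [Function.comp_apply]
  congr 1
  omega

-- ===== VERDICT (by name: the statement is the Claim_ definition above) =====
theorem gerar_distribuicao_distribuida_spec : Claim_equal_gerar_distribuicao_distribuida := by
  intro cores tam _ hpre
  unfold Spec_gerar_distribuicao_distribuida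
  by_cases h1 : tam ≤ 0
  · rw [pvCaseNonpos cores tam h1, pvAltNonpos cores tam h1]
  · by_cases h2 : cores < tam
    · rw [pvCaseFewCores cores tam (by omega) h2, pvAltFewCores cores tam (by omega) h2]
    · exact pvMain cores tam (by omega) (by unfold Pre_gerar_distribuicao_distribuida at hpre; omega)
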